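-- pv_equiv track=rewrite | github.com/Divyajyoti1801/Interview_Prepration | Technical_Interview_Concepts/Stack_Bases_Questions/Remove_all_duplicates.py | remove_all_duplicates_in_string
-- ===== SOURCE A (Python) =====
-- def remove_all_duplicates_in_string(s, k):
--     stack = []
--     for c in s:
--         if stack and stack[-1][0] == c:
--             stack[-1][1] += 1
--         else:
--             stack.append([c, 1])
--
--         if stack[-1][1] == k:
--             stack.pop()
--
--     res = ""
--     for c, count in stack:
--         res += (c * count)
--     return res
-- ===== SOURCE B (Python) =====
-- def _remove_first_run(s, k):
--     # return s with the first run of k consecutive equal characters removed, or None if there is none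
--     for i in range(len(s) - k + 1):
--         if s[i:i + k] == s[i] * k:
--             return s[:i] + s[i + k:]
--     return None
--
-- def remove_all_duplicates_in_string(s, k):
--     if k <= 0:
--         return s
--     while True:
--         t = _remove_first_run(s, k)
--         if t is None:
--             return s
--         s = t
-- ===== Notes on version B (the rewrite author's own statement) =====
-- stated objective: alternative
-- what changed: Replaced the one-pass stack of (char,count) pairs by iterated brute-force removal: repeatedly scan for the first window of k equal consecutive characters and splice it out until no such window remains.
import Mathlib
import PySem

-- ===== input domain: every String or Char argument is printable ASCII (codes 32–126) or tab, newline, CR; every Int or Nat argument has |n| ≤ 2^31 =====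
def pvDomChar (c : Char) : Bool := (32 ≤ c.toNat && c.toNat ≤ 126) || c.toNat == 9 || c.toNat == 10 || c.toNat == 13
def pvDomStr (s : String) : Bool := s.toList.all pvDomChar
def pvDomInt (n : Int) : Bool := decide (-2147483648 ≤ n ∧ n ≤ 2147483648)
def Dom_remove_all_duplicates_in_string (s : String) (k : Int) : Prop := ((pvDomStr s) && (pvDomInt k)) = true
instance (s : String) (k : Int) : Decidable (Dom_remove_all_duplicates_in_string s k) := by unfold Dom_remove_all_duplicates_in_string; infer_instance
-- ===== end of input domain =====

-- B replaces A's single stack pass by iterated removal of the first k-run; alternative algorithm, not faster.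

-- ===== PORT A =====
-- A-side helper: the body of A's for-loop (the stack is held top-first; Python appends at the end)
def pvStepA (k : Int) (stack : List (Char × Int)) (c : Char) : List (Char × Int) :=
  let stack :=
    match stack with
    | (c0, n) :: rest => if c0 == c then (c0, n + 1) :: rest else (c, (1 : Int)) :: (c0, n) :: rest
    | [] => [(c, (1 : Int))]
  match stack with
  | (c0, n) :: rest => if n == k then rest else (c0, n) :: rest
  | [] => []

def remove_all_duplicates_in_string (s : String) (k : Int) : String :=
  let stack := s.toList.foldl (pvStepA k) []
  String.ofList (stack.reverse.foldl (fun res p => res ++ List.replicate p.2.toNat p.1) [])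

-- ===== PORT B =====
-- B-side helper: first run of k equal consecutive chars removed, or none if there is no such run
-- (like Python's range bound, a window is only tested where it fits entirely)
def pvFindRemove (k : Nat) : List Char → Option (List Char)
  | [] => none
  | c :: rest =>
      if k ≤ (c :: rest).length && ((c :: rest).take k).all (· == c) then
        some ((c :: rest).drop k)
      else (pvFindRemove k rest).map (fun t => c :: t)

-- B-side helper: B's while-loop; the fuel only makes it total (each removal strictly shortens the list)
def pvLoop : Nat → Nat → List Char → List Char
  | 0, _, cs => cs
  | fuel + 1, k, cs =>
      match pvFindRemove k cs with
      | none => cs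
      | some cs' => pvLoop fuel k cs'

def remove_all_duplicates_in_string_alt (s : String) (k : Int) : String :=
  if k ≤ 0 then s else String.ofList (pvLoop s.toList.length k.toNat s.toList)

-- ===== PRECONDITION & SPEC =====
def Spec_remove_all_duplicates_in_string (s : String) (k : Int) (out : String) : Prop := out = remove_all_duplicates_in_string_alt s k
instance (s : String) (k : Int) (out : String) : Decidable (Spec_remove_all_duplicates_in_string s k out) := by unfold Spec_remove_all_duplicates_in_string; infer_instance

-- ===== CLAIM (what is proved, stated in full; the proofs are below) =====
def Claim_equal_remove_all_duplicates_in_string : Prop := ∀ (s : String) (k : Int), Dom_remove_all_duplicates_in_string s k → Spec_remove_all_duplicates_in_string s k (remove_all_duplicates_in_string s k)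

-- ===== LEMMAS AND PROOFS =====

-- the stack rendered to the output character list (bottom-first)
def pvFlat (st : List (Char × Int)) : List Char :=
  (st.reverse.map (fun p => List.replicate p.2.toNat p.1)).flatten

-- adjacent stack entries carry different chars
def NoAdj : List (Char × Int) → Prop
  | [] => True
  | [_] => True
  | a :: b :: t => a.1 ≠ b.1 ∧ NoAdj (b :: t)

-- A's stack invariant: adjacent entries carry different chars, counts lie in [1, k)
def Good (k : Int) (st : List (Char × Int)) : Prop :=
  NoAdj st ∧ ∀ p ∈ st, 1 ≤ p.2 ∧ p.2 < k

-- the head entry of the stack (if any) does not carry char c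
def TopNe (c : Char) : List (Char × Int) → Prop
  | [] => True
  | p :: _ => p.1 ≠ c

lemma foldl_app {α β : Type} (f : α → List β) :
    ∀ (l : List α) (acc : List β),
      l.foldl (fun r p => r ++ f p) acc = acc ++ (l.map f).flatten := by
  intro l
  induction l with
  | nil => intro acc; simp
  | cons x xs ih => intro acc; simp [List.foldl_cons, ih]

lemma portA_eq (s : String) (k : Int) :
    remove_all_duplicates_in_string s k
      = String.ofList (pvFlat (s.toList.foldl (pvStepA k) [])) := by
  simp [remove_all_duplicates_in_string, pvFlat,
    foldl_app (fun p : Char × Int => List.replicate p.2.toNat p.1)]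

lemma flat_cons (c : Char) (m : Int) (st : List (Char × Int)) :
    pvFlat ((c, m) :: st) = pvFlat st ++ List.replicate m.toNat c := by
  simp [pvFlat]

-- computation lemmas for pvStepA
lemma stepA_nil_pop {k : Int} (c : Char) (h : k = 1) : pvStepA k [] c = [] := by
  simp [pvStepA, h]

lemma stepA_nil {k : Int} (c : Char) (h : k ≠ 1) : pvStepA k [] c = [(c, 1)] := by
  simp [pvStepA]; omega

lemma stepA_push {k : Int} {c0 c : Char} (n : Int) (rest : List (Char × Int))
    (h : c0 ≠ c) (h1 : k ≠ 1) :
    pvStepA k ((c0, n) :: rest) c = (c, 1) :: (c0, n) :: rest := by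
  simp [pvStepA, h]; omega

lemma stepA_push_pop {k : Int} {c0 c : Char} (n : Int) (rest : List (Char × Int))
    (h : c0 ≠ c) (h1 : k = 1) :
    pvStepA k ((c0, n) :: rest) c = (c0, n) :: rest := by
  simp [pvStepA, h, h1]

lemma stepA_merge {k : Int} {c : Char} {n : Int} (rest : List (Char × Int))
    (h : n + 1 ≠ k) :
    pvStepA k ((c, n) :: rest) c = (c, n + 1) :: rest := by
  simp [pvStepA, h]

lemma stepA_merge_pop {k : Int} {c : Char} {n : Int} (rest : List (Char × Int))
    (h : n + 1 = k) :
    pvStepA k ((c, n) :: rest) c = rest := by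
  simp [pvStepA, h]

-- k ≤ 0: no pop ever fires, A reproduces its input
lemma step_nonpos {k : Int} (hk : k ≤ 0) {st : List (Char × Int)}
    (hp : ∀ p ∈ st, 1 ≤ p.2) (c : Char) :
    pvFlat (pvStepA k st c) = pvFlat st ++ [c] ∧ ∀ p ∈ pvStepA k st c, 1 ≤ p.2 := by
  match st with
  | [] =>
      rw [stepA_nil c (by omega)]
      constructor
      · simp [pvFlat]
      · simp
  | (c0, n) :: rest =>
      have hn : 1 ≤ n := hp (c0, n) (by simp)
      by_cases hc : c0 = c
      · subst hc
        rw [stepA_merge rest (by omega)]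
        constructor
        · rw [flat_cons, flat_cons]
          have h1 : (n + 1).toNat = n.toNat + 1 := by omega
          rw [h1, List.replicate_succ', List.append_assoc]
        · intro p hpm
          rcases List.mem_cons.mp hpm with h | h
          · subst h; simp; omega
          · exact hp p (by simp [h])
      · rw [stepA_push n rest hc (by omega)]
        constructor
        · rw [flat_cons]; simp
        · intro p hpm
          rcases List.mem_cons.mp hpm with h | h
          · subst h; simp
          · exact hp p h

lemma nonpos_fold {k : Int} (hk : k ≤ 0) :
    ∀ (cs : List Char) (st : List (Char × Int)), (∀ p ∈ st, 1 ≤ p.2) →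
      pvFlat (List.foldl (pvStepA k) st cs) = pvFlat st ++ cs := by
  intro cs
  induction cs with
  | nil => intro st _; simp
  | cons c t ih =>
      intro st hp
      have h := step_nonpos hk hp c
      simp only [List.foldl_cons]
      rw [ih _ h.2, h.1, List.append_assoc]
      rfl

-- feeding j copies of c onto a stack whose top is (c, m), without reaching k
lemma feedInc {k : Int} (c : Char) :
    ∀ (j : Nat) (m : Int) (st : List (Char × Int)), 1 ≤ m → m + j < k →
      List.foldl (pvStepA k) ((c, m) :: st) (List.replicate j c) = (c, m + j) :: st := by
  intro j
  induction j with
  | zero => intro m st _ _; simp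
  | succ j ih =>
      intro m st hm hj
      rw [List.replicate_succ, List.foldl_cons,
        stepA_merge (k := k) (c := c) (n := m) st (by push_cast at hj; omega)]
      rw [ih (m + 1) st (by omega) (by push_cast at hj ⊢; omega)]
      have h1 : m + 1 + (j : Int) = m + ((j + 1 : Nat) : Int) := by push_cast; ring
      rw [h1]

-- feeding exactly k - m copies pops the top entry
lemma feedPop {k : Int} (c : Char) (j : Nat) (m : Int) (st : List (Char × Int))
    (hm : 1 ≤ m) (hj : m + j = k) (hj1 : 1 ≤ j) :
    List.foldl (pvStepA k) ((c, m) :: st) (List.replicate j c) = st := by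
  obtain ⟨j', rfl⟩ : ∃ j', j = j' + 1 := ⟨j - 1, by omega⟩
  rw [List.replicate_succ', List.foldl_append,
    feedInc c j' m st hm (by push_cast at hj ⊢; omega)]
  simp only [List.foldl_cons, List.foldl_nil]
  exact stepA_merge_pop (k := k) (c := c) (n := m + (j' : Int)) st (by push_cast at hj; omega)

-- feeding 1 ≤ j < k copies of c onto a stack not topped by c pushes the run
lemma feedFresh_lt {k : Int} (c : Char) (j : Nat) (st : List (Char × Int))
    (h1 : 1 ≤ j) (hj : (j : Int) < k) (h : TopNe c st) :
    List.foldl (pvStepA k) st (List.replicate j c) = (c, (j : Int)) :: st := by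
  obtain ⟨j', rfl⟩ : ∃ j', j = j' + 1 := ⟨j - 1, by omega⟩
  have hk1 : k ≠ 1 := by push_cast at hj; omega
  have hfst : pvStepA k st c = (c, 1) :: st := by
    match st, h with
    | [], _ => exact stepA_nil c hk1
    | (c0, n) :: rest, h => exact stepA_push n rest h hk1
  rw [List.replicate_succ, List.foldl_cons, hfst,
    feedInc c j' 1 st (by omega) (by push_cast at hj; omega)]
  have h1 : (1 : Int) + (j' : Int) = ((j' + 1 : Nat) : Int) := by push_cast; ring
  rw [h1]

-- feeding exactly k copies of c onto a stack not topped by c leaves it unchanged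
lemma feedFresh_k {k : Int} (c : Char) (st : List (Char × Int))
    (hk : 1 ≤ k) (h : TopNe c st) :
    List.foldl (pvStepA k) st (List.replicate k.toNat c) = st := by
  by_cases hk1 : k = 1
  · subst hk1
    match st, h with
    | [], _ => simp [stepA_nil_pop c rfl]
    | (c0, n) :: rest, h => simp [stepA_push_pop n rest h rfl]
  · have hfst : pvStepA k st c = (c, 1) :: st := by
      match st, h with
      | [], _ => exact stepA_nil c hk1
      | (c0, n) :: rest, h => exact stepA_push n rest h hk1
    obtain ⟨j', hj'⟩ : ∃ j', k.toNat = j' + 1 := ⟨k.toNat - 1, by omega⟩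
    rw [hj', List.replicate_succ, List.foldl_cons, hfst,
      feedPop c j' 1 st (by omega) (by omega) (by omega)]

-- the pump lemma: a whole run of k equal chars leaves a Good stack unchanged
lemma pump {k : Int} (c : Char) (st : List (Char × Int))
    (hk : 1 ≤ k) (hg : Good k st) :
    List.foldl (pvStepA k) st (List.replicate k.toNat c) = st := by
  match st with
  | [] => exact feedFresh_k c [] hk trivial
  | (c0, m) :: rest =>
      by_cases hc : c0 = c
      · subst hc
        have hm : 1 ≤ m ∧ m < k := hg.2 (c0, m) (by simp)
        have htn : TopNe c0 rest := by
          match rest, hg.1 with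
          | [], _ => trivial
          | b :: t, h => exact fun hb => h.1 hb.symm
        have hsplit : k.toNat = (k - m).toNat + m.toNat := by omega
        rw [hsplit, List.replicate_add, List.foldl_append,
          feedPop c0 (k - m).toNat m rest hm.1 (by omega) (by omega),
          feedFresh_lt c0 m.toNat rest (by omega) (by omega) htn]
        rw [Int.toNat_of_nonneg (by omega)]
      · exact feedFresh_k c _ hk hc

lemma good_step {k : Int} (hk : 1 ≤ k) {st : List (Char × Int)}
    (hg : Good k st) (c : Char) : Good k (pvStepA k st c) := by
  match st with
  | [] =>
      by_cases h1 : k = 1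
      · rw [stepA_nil_pop c h1]; exact hg
      · rw [stepA_nil c h1]
        exact ⟨trivial, by intro p hp; simp at hp; subst hp; refine ⟨by simp, by simp; omega⟩⟩
  | (c0, n) :: rest =>
      have hn := hg.2 (c0, n) (by simp)
      by_cases hc : c0 = c
      · subst hc
        by_cases hpop : n + 1 = k
        · rw [stepA_merge_pop rest hpop]
          refine ⟨?_, fun p hp => hg.2 p (by simp [hp])⟩
          match rest, hg.1 with
          | [], _ => trivial
          | b :: t, h => exact h.2
        · rw [stepA_merge rest hpop]
          constructor
          · match rest, hg.1 with
            | [], _ => trivial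
            | b :: t, h => exact ⟨h.1, h.2⟩
          · intro p hp
            rcases List.mem_cons.mp hp with h | h
            · subst h; constructor <;> simp <;> omega
            · exact hg.2 p (by simp [h])
      · by_cases h1 : k = 1
        · rw [stepA_push_pop n rest hc h1]; exact hg
        · rw [stepA_push n rest hc h1]
          constructor
          · exact ⟨fun h => hc h.symm, hg.1⟩
          · intro p hp
            rcases List.mem_cons.mp hp with h | h
            · subst h; constructor <;> simp <;> omega
            · exact hg.2 p h

lemma good_fold {k : Int} (hk : 1 ≤ k) :
    ∀ (cs : List Char) (st : List (Char × Int)), Good k st →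
      Good k (List.foldl (pvStepA k) st cs) := by
  intro cs
  induction cs with
  | nil => intro st h; simpa using h
  | cons c t ih => intro st h; simpa using ih _ (good_step hk h c)

-- the window test of pvFindRemove, expressed as a prefix
lemma window_iff {K : Nat} {c : Char} {cs : List Char} :
    (K ≤ cs.length && (cs.take K).all (· == c)) = true ↔ List.replicate K c <+: cs := by
  constructor
  · intro h
    simp only [Bool.and_eq_true, decide_eq_true_eq] at h
    have hrep : cs.take K = List.replicate K c := by
      have hlen : (cs.take K).length = K := by simp; omega
      have hh : cs.take K = List.replicate (cs.take K).length c :=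
        List.eq_replicate_of_mem (fun b hb => by
          have h2 := h.2
          rw [List.all_eq_true] at h2
          simpa using h2 b hb)
      rwa [hlen] at hh
    rw [← hrep]
    exact List.take_prefix K cs
  · rintro ⟨v, hv⟩
    have hlen : K ≤ cs.length := by rw [← hv]; simp
    have htake : cs.take K = List.replicate K c := by
      rw [← hv, List.take_left' (by simp)]
    simp only [Bool.and_eq_true, decide_eq_true_eq, htake]
    refine ⟨hlen, ?_⟩
    rw [List.all_eq_true]
    intro b hb
    simpa using (List.eq_of_mem_replicate hb)

-- pvFindRemove facts
lemma findRemove_none_cons {K : Nat} {c : Char} {t : List Char}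
    (h : pvFindRemove K (c :: t) = none) :
    ¬ (List.replicate K c <+: (c :: t)) ∧ pvFindRemove K t = none := by
  by_cases hp : (K ≤ (c :: t).length && ((c :: t).take K).all (· == c)) = true
  · rw [pvFindRemove, if_pos hp] at h
    simp at h
  · rw [pvFindRemove, if_neg hp] at h
    exact ⟨fun hpre => hp (window_iff.mpr hpre), by simpa using h⟩

lemma findRemove_none_dropWhile {K : Nat} (p : Char → Bool) :
    ∀ cs : List Char, pvFindRemove K cs = none →
      pvFindRemove K (cs.dropWhile p) = none := by
  intro cs
  induction cs with
  | nil => intro h; simpa using h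
  | cons c t ih =>
      intro h
      rw [List.dropWhile_cons]
      by_cases hc : p c
      · simp only [hc, if_true]
        exact ih (findRemove_none_cons h).2
      · simpa [hc] using h

lemma findRemove_some_spec {K : Nat} :
    ∀ (cs cs' : List Char), pvFindRemove K cs = some cs' →
      ∃ u c v, cs = u ++ List.replicate K c ++ v ∧ cs' = u ++ v := by
  intro cs
  induction cs with
  | nil => intro cs' h; simp [pvFindRemove] at h
  | cons c t ih =>
      intro cs' h
      by_cases hp : (K ≤ (c :: t).length && ((c :: t).take K).all (· == c)) = true
      · rw [pvFindRemove, if_pos hp] at h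
        have hpre : List.replicate K c <+: c :: t := window_iff.mp hp
        obtain ⟨v, hv⟩ := hpre
        refine ⟨[], c, v, by simpa using hv.symm, ?_⟩
        have := h.symm
        simp only [Option.some.injEq] at this
        rw [this, ← hv, List.drop_left' (by simp)]
        simp
      · rw [pvFindRemove, if_neg hp] at h
        rcases Option.map_eq_some_iff.mp h with ⟨t', ht', hmap⟩
        obtain ⟨u, ch, v, hcs, hcs'⟩ := ih t' ht'
        exact ⟨c :: u, ch, v, by simp [hcs], by simp [← hmap, hcs']⟩

lemma dropWhile_head_not {α : Type} (p : α → Bool) :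
    ∀ (l : List α) (c' : α) (t' : List α), l.dropWhile p = c' :: t' → p c' = false := by
  intro l
  induction l with
  | nil => intro c' t' h; simp [List.dropWhile] at h
  | cons a l ih =>
      intro c' t' h
      rw [List.dropWhile_cons] at h
      by_cases ha : p a
      · exact ih c' t' (by simpa [ha] using h)
      · simp [ha] at h
        rw [← h.1]
        simpa using ha

-- no k-run anywhere: A's stack just records the input
lemma gen {k : Int} (hk : 1 ≤ k) :
    ∀ (n : Nat) (cs : List Char) (st : List (Char × Int)), cs.length ≤ n →
      Good k st → (∀ c t, cs = c :: t → TopNe c st) →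
      pvFindRemove k.toNat cs = none →
      pvFlat (List.foldl (pvStepA k) st cs) = pvFlat st ++ cs := by
  intro n
  induction n with
  | zero =>
      intro cs st hlen _ _ _
      have : cs = [] := List.eq_nil_of_length_eq_zero (by omega)
      subst this; simp
  | succ n ih =>
      intro cs st hlen hg htop hnone
      match cs with
      | [] => simp
      | c :: t =>
        have htw : (c :: t).takeWhile (· == c) = c :: t.takeWhile (· == c) := by
          simp
        have hrep : (c :: t).takeWhile (· == c)
            = List.replicate ((c :: t).takeWhile (· == c)).length c := by
          apply List.eq_replicate_of_mem
          intro b hb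
          have := List.mem_takeWhile_imp hb
          simpa using this
        set m := ((c :: t).takeWhile (· == c)).length with hmdef
        set rest := (c :: t).dropWhile (· == c) with hrdef
        have hm1 : 1 ≤ m := by rw [hmdef, htw]; simp
        have hsplit : c :: t = List.replicate m c ++ rest := by
          conv_lhs => rw [← List.takeWhile_append_dropWhile (p := (· == c)) (l := c :: t)]
          rw [← hrep]
        have hresthead : ∀ c' t', rest = c' :: t' → c' ≠ c := by
          intro c' t' h
          have := dropWhile_head_not (· == c) (c :: t) c' t' h
          simpa using this
        have hmlt : m < k.toNat := by
          by_contra hge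
          have hKm : List.replicate k.toNat c <+: List.replicate m c :=
            ⟨List.replicate (m - k.toNat) c, by rw [← List.replicate_add]; congr 1; omega⟩
          have hpre : List.replicate k.toNat c <+: c :: t := by
            refine hKm.trans ?_
            rw [← hrep]
            exact List.takeWhile_prefix _
          exact (findRemove_none_cons hnone).1 hpre
        have hlenrest : rest.length ≤ n := by
          have := congrArg List.length hsplit
          simp [List.length_append] at this
          simp at hlen
          omega
        have hgood' : Good k ((c, (m : Int)) :: st) := by
          constructor
          · match st, htop c t rfl with
            | [], _ => trivial
            | b :: t2, h => exact ⟨fun hh => h hh.symm, hg.1⟩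
          · intro p hp
            rcases List.mem_cons.mp hp with h | h
            · subst h
              constructor
              · simp; omega
              · simp; omega
            · exact hg.2 p h
        have htop' : ∀ c' t', rest = c' :: t' → TopNe c' ((c, (m : Int)) :: st) :=
          fun c' t' h => fun hh => hresthead c' t' h (hh.symm)
        have hnone' : pvFindRemove k.toNat rest = none := by
          rw [hrdef]
          exact findRemove_none_dropWhile _ _ hnone
        rw [hsplit, List.foldl_append,
          feedFresh_lt c m st hm1 (by omega) (htop c t rfl),
          ih rest ((c, (m : Int)) :: st) hlenrest hgood' htop' hnone',
          flat_cons]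
        simp [List.append_assoc]

lemma main_pos {k : Int} (hk : 1 ≤ k) :
    ∀ (n : Nat) (cs : List Char), cs.length ≤ n →
      pvFlat (List.foldl (pvStepA k) [] cs) = pvLoop n k.toNat cs := by
  intro n
  induction n with
  | zero =>
      intro cs hlen
      have : cs = [] := List.eq_nil_of_length_eq_zero (by omega)
      subst this
      simp [pvLoop, pvFlat]
  | succ n ih =>
      intro cs hlen
      cases h : pvFindRemove k.toNat cs with
      | none =>
          rw [pvLoop, h]
          have := gen hk (n + 1) cs [] hlen ⟨trivial, by simp⟩ (fun _ _ _ => trivial) h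
          simpa [pvFlat] using this
      | some cs' =>
          obtain ⟨u, ch, v, hcs, hcs'⟩ := findRemove_some_spec cs cs' h
          have hfold : List.foldl (pvStepA k) [] cs = List.foldl (pvStepA k) [] cs' := by
            rw [hcs, hcs', List.foldl_append, List.foldl_append, List.foldl_append,
              pump ch _ hk (good_fold hk u [] ⟨trivial, by simp⟩)]
          have hlen' : cs'.length ≤ n := by
            have h1 := congrArg List.length hcs
            have h2 := congrArg List.length hcs'
            simp [List.length_append] at h1 h2
            omega
          rw [pvLoop, h, hfold]
          exact ih cs' hlen'

-- ===== VERDICT (by name: the statement is the Claim_ definition above) =====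
theorem remove_all_duplicates_in_string_spec : Claim_equal_remove_all_duplicates_in_string := by
  intro s k _
  unfold Spec_remove_all_duplicates_in_string remove_all_duplicates_in_string_alt
  rw [portA_eq]
  by_cases hk : k ≤ 0
  · rw [if_pos hk, nonpos_fold hk s.toList [] (by simp)]
    simp [pvFlat]
  · rw [if_neg hk, main_pos (by omega) s.toList.length s.toList le_rfl]
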